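-- pv_equiv track=rewrite | github.com/idealy-ma/bloom-filter | bloom/bloom.py | bloomFilter
-- ===== SOURCE A (Python) =====
-- def myHashOne(word):
--     hash_value = 0
--     for w in word:
--         hash_value += ord(w)
--     return(hash_value)
--
-- def myHashTwo(word):
--     hash_val = 0
--     for char in word :
--         hash_val = (hash_val << 2) ^ (hash_val >> 28) ^ ord(char)
--     return hash_val%10
--
-- def myHashThree(word):
--     prime = 1099511628211
--     hash_val = 14695981039346656037
--     for char in word:
--         hash_val = hash_val * prime
--         hash_val = hash_val ^ ord(char)
--     return hash_val%10
--
-- def bloomFilter(wordList):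
--     bloom = 0
--     for word in wordList :
--         resultOne = myHashOne(word)
--         resultTwo = myHashTwo(word)
--         resultThree = myHashThree(word)
--
--         bloom |= 1 << resultOne
--         bloom |= 1 << resultTwo
--         bloom |= 1 << resultThree
--
--     return bloom
-- ===== SOURCE B (Python) =====
-- def bloomFilter(wordList):
--     # One fused scan per word: the three hash accumulators are updated together
--     # in a single pass over the characters instead of three separate helper loops.
--     bloom = 0
--     for word in wordList:
--         h1 = 0
--         h2 = 0
--         h3 = 14695981039346656037
--         for ch in word:
--             o = ord(ch)
--             h1 += o
--             h2 = (h2 << 2) ^ (h2 >> 28) ^ o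
--             h3 = (h3 * 1099511628211) ^ o
--         bloom |= (1 << h1) | (1 << (h2 % 10)) | (1 << (h3 % 10))
--     return bloom
-- ===== Notes on version B (the rewrite author's own statement) =====
-- stated objective: alternative
-- what changed: The three per-word hash helper loops are fused into a single pass over each word's characters maintaining three running accumulators, and each word's three bits are combined into one mask OR-ed into the filter once.
import Mathlib
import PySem

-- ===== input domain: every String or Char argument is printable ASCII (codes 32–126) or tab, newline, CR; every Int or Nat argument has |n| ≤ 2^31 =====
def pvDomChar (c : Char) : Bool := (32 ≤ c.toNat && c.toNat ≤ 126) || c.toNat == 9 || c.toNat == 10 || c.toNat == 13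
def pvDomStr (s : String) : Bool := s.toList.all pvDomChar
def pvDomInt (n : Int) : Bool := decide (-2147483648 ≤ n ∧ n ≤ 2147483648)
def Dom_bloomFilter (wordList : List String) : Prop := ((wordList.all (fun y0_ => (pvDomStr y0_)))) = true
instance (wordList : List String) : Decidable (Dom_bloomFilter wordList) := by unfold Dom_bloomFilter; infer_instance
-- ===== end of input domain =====

-- B fuses A's three per-word hash loops into one scan per word; equivalence of return values.

-- ===== PORT A =====
-- Python's '1 << r' (r provably nonnegative here: a sum of ords, and mods by 10), exact via .toNat
def pyShl1 (r : Int) : Int := (1 : Int) <<< r.toNat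

def myHashOne (word : String) : Int :=
  word.toList.foldl (fun h c => h + (c.toNat : Int)) 0

def myHashTwo (word : String) : Int :=
  PySem.Int.mod
    (word.toList.foldl
      (fun h c => PySem.Int.bxor (PySem.Int.bxor (h <<< (2 : Nat)) (h >>> (28 : Nat))) (c.toNat : Int)) 0)
    10

def myHashThree (word : String) : Int :=
  PySem.Int.mod
    (word.toList.foldl
      (fun h c => PySem.Int.bxor (h * 1099511628211) (c.toNat : Int)) 14695981039346656037)
    10

def bloomFilter (wordList : List String) : Int :=
  wordList.foldl (fun bloom word =>
    let resultOne := myHashOne word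
    let resultTwo := myHashTwo word
    let resultThree := myHashThree word
    let bloom := PySem.Int.bor bloom (pyShl1 resultOne)
    let bloom := PySem.Int.bor bloom (pyShl1 resultTwo)
    PySem.Int.bor bloom (pyShl1 resultThree)) 0

-- ===== PORT B =====
def bloomStep (a : Int × Int × Int) (c : Char) : Int × Int × Int :=
  let o : Int := (c.toNat : Int)
  (a.1 + o,
   PySem.Int.bxor (PySem.Int.bxor (a.2.1 <<< (2 : Nat)) (a.2.1 >>> (28 : Nat))) o,
   PySem.Int.bxor (a.2.2 * 1099511628211) o)

def bloomFilter_alt (wordList : List String) : Int :=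
  wordList.foldl (fun bloom word =>
    let s := word.toList.foldl bloomStep (0, 0, 14695981039346656037)
    PySem.Int.bor bloom
      (PySem.Int.bor
        (PySem.Int.bor (pyShl1 s.1)
                       (pyShl1 (PySem.Int.mod s.2.1 10)))
        (pyShl1 (PySem.Int.mod s.2.2 10)))) 0

-- ===== PRECONDITION & SPEC =====
def Spec_bloomFilter (wordList : List String) (out : Int) : Prop := out = bloomFilter_alt wordList
instance (wordList : List String) (out : Int) : Decidable (Spec_bloomFilter wordList out) := by unfold Spec_bloomFilter; infer_instance

-- ===== CLAIM (what is proved, stated in full; the proofs are below) =====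
def Claim_equal_bloomFilter : Prop := ∀ (wordList : List String), Dom_bloomFilter wordList → Spec_bloomFilter wordList (bloomFilter wordList)

-- ===== LEMMAS AND PROOFS =====

-- the fused scan computes the three separate folds
theorem bloomStep_foldl (cs : List Char) (a b c : Int) :
    cs.foldl bloomStep (a, b, c) =
      (cs.foldl (fun h ch => h + (ch.toNat : Int)) a,
       cs.foldl (fun h ch => PySem.Int.bxor (PySem.Int.bxor (h <<< (2 : Nat)) (h >>> (28 : Nat))) (ch.toNat : Int)) b,
       cs.foldl (fun h ch => PySem.Int.bxor (h * 1099511628211) (ch.toNat : Int)) c) := by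
  induction cs generalizing a b c with
  | nil => rfl
  | cons x xs ih => simp [List.foldl, bloomStep, ih]

theorem bor_nonneg (x y : Int) (hx : 0 ≤ x) (hy : 0 ≤ y) : 0 ≤ PySem.Int.bor x y := by
  rw [PySem.Int.bor_of_nonneg hx hy]; exact Int.natCast_nonneg _

theorem shiftLeft_one_nonneg (k : Int) : 0 ≤ pyShl1 k := by
  unfold pyShl1; rw [Int.shiftLeft_eq]; positivity

-- re-association of the OR of nonnegative values
theorem bor_reassoc (b x y z : Int) (hb : 0 ≤ b) (hx : 0 ≤ x) (hy : 0 ≤ y) (hz : 0 ≤ z) :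
    PySem.Int.bor (PySem.Int.bor (PySem.Int.bor b x) y) z =
      PySem.Int.bor b (PySem.Int.bor (PySem.Int.bor x y) z) := by
  obtain ⟨bn, rfl⟩ := Int.eq_ofNat_of_zero_le hb
  obtain ⟨xn, rfl⟩ := Int.eq_ofNat_of_zero_le hx
  obtain ⟨yn, rfl⟩ := Int.eq_ofNat_of_zero_le hy
  obtain ⟨zn, rfl⟩ := Int.eq_ofNat_of_zero_le hz
  simp [Nat.lor_assoc]

theorem step_eq (bloom : Int) (hb : 0 ≤ bloom) (word : String) :
    PySem.Int.bor
      (PySem.Int.bor (PySem.Int.bor bloom (pyShl1 (myHashOne word)))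
        (pyShl1 (myHashTwo word)))
      (pyShl1 (myHashThree word)) =
    PySem.Int.bor bloom
      (PySem.Int.bor
        (PySem.Int.bor (pyShl1 (word.toList.foldl bloomStep (0, 0, 14695981039346656037)).1)
          (pyShl1 (PySem.Int.mod (word.toList.foldl bloomStep (0, 0, 14695981039346656037)).2.1 10)))
        (pyShl1 (PySem.Int.mod (word.toList.foldl bloomStep (0, 0, 14695981039346656037)).2.2 10))) := by
  simp only [bloomStep_foldl]
  rw [bor_reassoc _ _ _ _ hb (shiftLeft_one_nonneg _) (shiftLeft_one_nonneg _) (shiftLeft_one_nonneg _)]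
  rfl

theorem bloomFilter_spec : Claim_equal_bloomFilter := by
  unfold Claim_equal_bloomFilter
  intro wordList _
  unfold Spec_bloomFilter bloomFilter bloomFilter_alt
  dsimp only
  suffices h : ∀ (ws : List String) (bloom : Int), 0 ≤ bloom →
      ws.foldl (fun bloom word =>
        PySem.Int.bor
          (PySem.Int.bor (PySem.Int.bor bloom (pyShl1 (myHashOne word)))
            (pyShl1 (myHashTwo word)))
          (pyShl1 (myHashThree word))) bloom =
      ws.foldl (fun bloom word =>
        PySem.Int.bor bloom
          (PySem.Int.bor
            (PySem.Int.bor (pyShl1 (word.toList.foldl bloomStep (0, 0, 14695981039346656037)).1)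
              (pyShl1 (PySem.Int.mod (word.toList.foldl bloomStep (0, 0, 14695981039346656037)).2.1 10)))
            (pyShl1 (PySem.Int.mod (word.toList.foldl bloomStep (0, 0, 14695981039346656037)).2.2 10)))) bloom by
    exact h wordList 0 le_rfl
  intro ws
  induction ws with
  | nil => intro bloom _; rfl
  | cons w ws ih =>
      intro bloom hb
      simp only [List.foldl]
      rw [step_eq bloom hb w]
      exact ih _ (bor_nonneg _ _ hb (bor_nonneg _ _
        (bor_nonneg _ _ (shiftLeft_one_nonneg _) (shiftLeft_one_nonneg _)) (shiftLeft_one_nonneg _)))
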